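-- pv_equiv track=rewrite | github.com/ryanfahimi/CS110 | 14.simpleInterpreterProject/lexer.py | getNextToken
-- ===== SOURCE A (Python) =====
-- def getNextToken(s, index, token):
--     if index >= len(s):
--         token["type"] = "EOF"
--         token["value"] = "-"
--     elif s[index].isspace():
--         # recursive function just to flex
--         index = getNextToken(s, index + 1, token)
--     elif s[index].isdigit():
--         token["type"] = "INT"
--         token["value"] = ""
--         index = getInt(s, index, token)
--     elif s[index].isalpha():
--         token["type"] = "ID"
--         token["value"] = ""
--         index = getId(s, index, token)
--     elif s[index] == "=":
--         token["type"] = "ASSIGNOP"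
--         token["value"] = "="
--         index += 1
--     elif s[index] == "+":
--         token["type"] = "PLUSOP"
--         token["value"] = "+"
--         index += 1
--     else:
--         token["type"] = "UNKNOWN"
--         token["value"] = s[index]
--         index += 1
--     return index
--
-- def getInt(s, index, token):
--     while index < len(s) and s[index].isdigit():
--         token["value"] += s[index]
--         index += 1
--     return index
--
-- def getId(s, index, token):
--     while index < len(s) and (s[index].isdigit() or s[index].isalpha()):
--         token["value"] += s[index]
--         index += 1
--     return index
-- ===== SOURCE B (Python) =====
-- def getNextToken(s, index, token):
--     # Iterative whitespace skip + one fused scan loop instead of A's recursion and helper functions.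
--     n = len(s)
--     while index < n and s[index].isspace():
--         index += 1
--     if index >= n:
--         token["type"] = "EOF"
--         token["value"] = "-"
--         return index
--     c = s[index]
--     if c.isdigit() or c.isalpha():
--         kind = "INT" if c.isdigit() else "ID"
--         value = ""
--         while index < n and (s[index].isdigit() or (kind == "ID" and s[index].isalpha())):
--             value += s[index]
--             index += 1
--         token["type"] = kind
--         token["value"] = value
--         return index
--     token["type"], token["value"] = {"=": ("ASSIGNOP", "="), "+": ("PLUSOP", "+")}.get(c, ("UNKNOWN", c))
--     return index + 1
-- ===== Notes on version B (the rewrite author's own statement) =====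
-- stated objective: simpler
-- what changed: B replaces A's self-recursive whitespace skipping and the two helper functions getInt/getId by an iterative skip loop plus one fused token-scan loop (kind chosen once), with a dict-based operator dispatch.
import Mathlib
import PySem

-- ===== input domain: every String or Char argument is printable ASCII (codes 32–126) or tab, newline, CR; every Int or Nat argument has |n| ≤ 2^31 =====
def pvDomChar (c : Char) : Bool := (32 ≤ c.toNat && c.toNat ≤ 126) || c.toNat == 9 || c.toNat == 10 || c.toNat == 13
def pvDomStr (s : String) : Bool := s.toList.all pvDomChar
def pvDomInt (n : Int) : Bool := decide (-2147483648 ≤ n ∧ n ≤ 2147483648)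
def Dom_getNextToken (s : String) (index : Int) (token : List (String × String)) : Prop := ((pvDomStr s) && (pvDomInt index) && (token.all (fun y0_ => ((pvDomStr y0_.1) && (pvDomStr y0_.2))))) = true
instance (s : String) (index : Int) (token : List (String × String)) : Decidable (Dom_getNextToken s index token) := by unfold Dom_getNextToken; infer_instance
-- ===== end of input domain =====

-- A mutates `token` in place; the equivalence proved here is about the RETURN value (the new index)
-- only — B's Python performs the identical token mutations. B: iterative whitespace skip + one fused
-- scan loop instead of A's self-recursion and two helper functions (objective: simpler).

-- ===== PORT A =====
-- A's helper getInt: while index < len(s) and s[index].isdigit(): index += 1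
def pvGetIntA (cs : List Char) (index : Int) : Int :=
  if h : index < (cs.length : Int) ∧
      (match PySem.List.pyGet? cs index with
       | some c => PySem.Chars.isdigit c
       | none => false) = true then
    pvGetIntA cs (index + 1)
  else index
termination_by ((cs.length : Int) - index).toNat
decreasing_by omega

-- A's helper getId: while index < len(s) and (s[index].isdigit() or s[index].isalpha()): index += 1
def pvGetIdA (cs : List Char) (index : Int) : Int :=
  if h : index < (cs.length : Int) ∧
      (match PySem.List.pyGet? cs index with
       | some c => PySem.Chars.isdigit c || PySem.Chars.isalpha c
       | none => false) = true then
    pvGetIdA cs (index + 1)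
  else index
termination_by ((cs.length : Int) - index).toNat
decreasing_by omega

-- A's recursive dispatch on the char list (token mutation dropped: return value only)
def pvGetNextTokenA (cs : List Char) (index : Int) : Int :=
  if _h : (cs.length : Int) ≤ index then index          -- EOF
  else
    match PySem.List.pyGet? cs index with
    | none => index                                    -- IndexError in Python (outside Pre_)
    | some c =>
      if PySem.Chars.isspace c then pvGetNextTokenA cs (index + 1)   -- recursive self-call
      else if PySem.Chars.isdigit c then pvGetIntA cs index
      else if PySem.Chars.isalpha c then pvGetIdA cs index
      else if c = '=' then index + 1
      else if c = '+' then index + 1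
      else index + 1
termination_by ((cs.length : Int) - index).toNat
decreasing_by omega

def getNextToken (s : String) (index : Int) (token : List (String × String)) : Int :=
  pvGetNextTokenA s.toList index

-- ===== PORT B =====
-- B: while index < n and s[index].isspace(): index += 1
def pvSkipWs (cs : List Char) (index : Int) : Int :=
  if h : index < (cs.length : Int) ∧
      (match PySem.List.pyGet? cs index with
       | some c => PySem.Chars.isspace c
       | none => false) = true then
    pvSkipWs cs (index + 1)
  else index
termination_by ((cs.length : Int) - index).toNat
decreasing_by omega

-- B's fused scan loop: while index < n and (s[index].isdigit() or (kind == "ID" and s[index].isalpha()))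
def pvScanTok (cs : List Char) (index : Int) (idKind : Bool) : Int :=
  if h : index < (cs.length : Int) ∧
      (match PySem.List.pyGet? cs index with
       | some c => PySem.Chars.isdigit c || (idKind && PySem.Chars.isalpha c)
       | none => false) = true then
    pvScanTok cs (index + 1) idKind
  else index
termination_by ((cs.length : Int) - index).toNat
decreasing_by omega

def getNextToken_alt (s : String) (index : Int) (token : List (String × String)) : Int :=
  let cs := s.toList
  let index := pvSkipWs cs index
  if (cs.length : Int) ≤ index then index              -- EOF
  else
    match PySem.List.pyGet? cs index with
    | none => index
    | some c =>
      if PySem.Chars.isdigit c || PySem.Chars.isalpha c then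
        pvScanTok cs index (!PySem.Chars.isdigit c)    -- kind = INT if digit else ID
      else index + 1                                   -- '=', '+' and UNKNOWN all advance by one

-- ===== PRECONDITION & SPEC =====
-- Pre_ excludes exactly index < -len(s), where A's s[index] raises IndexError (B raises there too).
def Pre_getNextToken (s : String) (index : Int) (token : List (String × String)) : Prop :=
  -(s.toList.length : Int) ≤ index
instance (s : String) (index : Int) (token : List (String × String)) : Decidable (Pre_getNextToken s index token) := by unfold Pre_getNextToken; infer_instance

def pvWitness_getNextToken : String × Int × (List (String × String)) := ("  x1 = 7", 0, [])

def Spec_getNextToken (s : String) (index : Int) (token : List (String × String)) (out : Int) : Prop := out = getNextToken_alt s index token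
instance (s : String) (index : Int) (token : List (String × String)) (out : Int) : Decidable (Spec_getNextToken s index token out) := by unfold Spec_getNextToken; infer_instance

-- ===== CLAIM (what is proved, stated in full; the proofs are below) =====
def Claim_equal_getNextToken : Prop := ∀ (s : String) (index : Int) (token : List (String × String)), Dom_getNextToken s index token → Pre_getNextToken s index token → Spec_getNextToken s index token (getNextToken s index token)

-- ===== LEMMAS AND PROOFS =====

-- A's getInt loop is B's scan loop with idKind = false
theorem pvGetIntA_eq_scan (cs : List Char) (index : Int) :
    pvGetIntA cs index = pvScanTok cs index false := by
  induction index using pvGetIntA.induct (cs := cs) with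
  | case1 i h ih =>
    rw [pvGetIntA, pvScanTok]
    simp only [Bool.false_and, Bool.or_false]
    simp [h, ih]
  | case2 i h =>
    rw [pvGetIntA, pvScanTok]
    simp only [Bool.false_and, Bool.or_false]
    simp [h]

-- A's getId loop is B's scan loop with idKind = true
theorem pvGetIdA_eq_scan (cs : List Char) (index : Int) :
    pvGetIdA cs index = pvScanTok cs index true := by
  induction index using pvGetIdA.induct (cs := cs) with
  | case1 i h ih =>
    rw [pvGetIdA, pvScanTok]
    simp only [Bool.true_and]
    simp [h, ih]
  | case2 i h =>
    rw [pvGetIdA, pvScanTok]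
    simp only [Bool.true_and]
    simp [h]

theorem pvSkipWs_step (cs : List Char) (index : Int) (c : Char)
    (h1 : index < (cs.length : Int)) (h2 : PySem.List.pyGet? cs index = some c)
    (h3 : PySem.Chars.isspace c = true) :
    pvSkipWs cs index = pvSkipWs cs (index + 1) := by
  rw [pvSkipWs]
  simp [h1, h2, h3]

theorem pvSkipWs_stop (cs : List Char) (index : Int)
    (h : ¬ (index < (cs.length : Int) ∧
      (match PySem.List.pyGet? cs index with
       | some c => PySem.Chars.isspace c
       | none => false) = true)) :
    pvSkipWs cs index = index := by
  rw [pvSkipWs]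
  simp [h]

-- the B-side dispatch after the whitespace skip
theorem pvAltDispatch (s : String) (index : Int) (token : List (String × String)) :
    getNextToken_alt s index token =
      (let cs := s.toList
       let j := pvSkipWs cs index
       if (cs.length : Int) ≤ j then j
       else
         match PySem.List.pyGet? cs j with
         | none => j
         | some c =>
           if PySem.Chars.isdigit c || PySem.Chars.isalpha c then
             pvScanTok cs j (!PySem.Chars.isdigit c)
           else j + 1) := rfl

-- main equivalence on the char list, for indices ≥ -len
theorem pvMain (cs : List Char) (index : Int) (hpre : -(cs.length : Int) ≤ index) :
    pvGetNextTokenA cs index =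
      (let j := pvSkipWs cs index
       if (cs.length : Int) ≤ j then j
       else
         match PySem.List.pyGet? cs j with
         | none => j
         | some c =>
           if PySem.Chars.isdigit c || PySem.Chars.isalpha c then
             pvScanTok cs j (!PySem.Chars.isdigit c)
           else j + 1) := by
  revert hpre
  induction index using pvGetNextTokenA.induct (cs := cs) with
  | case1 i h =>
    intro _
    rw [pvGetNextTokenA]
    rw [pvSkipWs_stop cs i (by intro hc; omega)]
    simp [h]
  | case2 i h hnone =>
    intro hpre
    exact absurd ((PySem.List.pyGet?_eq_none_iff cs i).mp hnone)
      (by simp [PySem.Raise.InRange]; omega)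
  | case3 i h c hc hsp ih =>
    intro hpre
    rw [pvGetNextTokenA]
    simp only [h, dite_false, hc, hsp, if_true]
    rw [pvSkipWs_step cs i c (by omega) hc hsp]
    exact ih (by omega)
  | case4 i h c hc hsp hdig =>
    intro _
    have hstop : pvSkipWs cs i = i := pvSkipWs_stop cs i (by simp [hc, hsp])
    rw [pvGetNextTokenA]
    simp only [h, dite_false, hc, hsp, hdig, if_true, if_false, hstop]
    simp [pvGetIntA_eq_scan]
  | case5 i h c hc hsp hdig halpha =>
    intro _
    have hstop : pvSkipWs cs i = i := pvSkipWs_stop cs i (by simp [hc, hsp])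
    rw [pvGetNextTokenA]
    simp only [h, dite_false, hc, hsp, hdig, halpha, if_true, if_false, hstop]
    simp [pvGetIdA_eq_scan]
  | case6 i h hget hnsp hnd hna =>
    intro _
    have hstop : pvSkipWs cs i = i := pvSkipWs_stop cs i (by simp [hget, hnsp])
    rw [pvGetNextTokenA]
    simp [h, hget, hnsp, hnd, hna, hstop]
  | case7 i h hget hnsp hnd hna hne =>
    intro _
    have hstop : pvSkipWs cs i = i := pvSkipWs_stop cs i (by simp [hget, hnsp])
    rw [pvGetNextTokenA]
    simp [h, hget, hnsp, hnd, hna, hstop]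
  | case8 i h c hget hnsp hnd hna hne1 hne2 =>
    intro _
    have hstop : pvSkipWs cs i = i := pvSkipWs_stop cs i (by simp [hget, hnsp])
    rw [pvGetNextTokenA]
    simp [h, hget, hnsp, hnd, hna, hne1, hne2, hstop]

-- ===== VERDICT (by name: the statement is the Claim_ definition above) =====
theorem getNextToken_spec : Claim_equal_getNextToken := by
  intro s index token _ hpre
  unfold Spec_getNextToken getNextToken
  rw [pvAltDispatch]
  exact pvMain s.toList index hpre
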